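-- pv_equiv track=rewrite | github.com/tachyon-beep/kaslite | morphogenetic_engine/ui/grids.py | _parse_layer_seed_format
-- ===== SOURCE A (Python) =====
-- def _parse_layer_seed_format(seed_id: str) -> tuple[int | None, int | None]:
--     """Parse layer_1_seed_2 format."""
--     try:
--         parts = seed_id.split("_")
--         layer_idx = None
--         seed_idx = None
--         for i, part in enumerate(parts):
--             if part == "LAYER" and i + 1 < len(parts):
--                 layer_idx = int(parts[i + 1])
--             elif part == "SEED" and i + 1 < len(parts):
--                 seed_idx = int(parts[i + 1])
--         return (layer_idx, seed_idx)
--     except (ValueError, IndexError):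
--         pass
--     return (None, None)
-- ===== SOURCE B (Python) =====
-- def _parse_layer_seed_format(seed_id: str) -> tuple[int | None, int | None]:
--     """Parse layer_1_seed_2 format."""
--     parts = seed_id.split("_")
--     # (token, successor) pairs scanned from the RIGHT: the first match found is
--     # the last occurrence, so the scan stops early and calls int() once per key.
--     pairs = list(zip(parts, parts[1:]))[::-1]
--
--     def find(key):
--         for tok, nxt in pairs:
--             if tok == key:
--                 return int(nxt)
--         return None
--
--     try:
--         return (find("LAYER"), find("SEED"))
--     except ValueError:
--         return (None, None)
-- ===== Notes on version B (the rewrite author's own statement) =====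
-- stated objective: alternative
-- what changed: Replaces A's single forward scan that accumulates both values (calling int() at every LAYER/SEED occurrence, last write wins) with two independent early-exit scans over the reversed (token, successor) pair list, each returning at the first match from the right with a single int() call.
-- outside the precondition, e.g. on _parse_layer_seed_format('LAYER_x_LAYER_3'): A returns (None, None), B returns (3, None)
import Mathlib
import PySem

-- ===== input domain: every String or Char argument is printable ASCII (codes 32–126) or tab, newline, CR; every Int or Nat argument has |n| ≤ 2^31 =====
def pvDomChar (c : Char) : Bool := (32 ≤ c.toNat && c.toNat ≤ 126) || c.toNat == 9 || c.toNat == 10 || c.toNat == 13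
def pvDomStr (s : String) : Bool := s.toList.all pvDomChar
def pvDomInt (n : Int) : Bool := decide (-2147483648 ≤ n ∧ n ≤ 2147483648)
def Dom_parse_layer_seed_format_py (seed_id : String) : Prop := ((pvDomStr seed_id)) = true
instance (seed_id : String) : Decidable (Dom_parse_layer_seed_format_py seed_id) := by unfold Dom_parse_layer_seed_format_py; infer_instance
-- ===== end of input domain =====

-- B replaces A's single forward scan accumulating both values by two independent
-- early-exit scans over the reversed (token, successor) pair list (first match from
-- the right = last occurrence), one int() call per key.


-- ===== PORT A =====
-- A's for-loop over enumerate(parts): the guard `i + 1 < len(parts)` is exactly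
-- "the current element has a successor", so the loop recurses on the suffix,
-- carrying the (layer_idx, seed_idx) state; `none` = an uncaught ValueError
-- (int() failed), which A's except turns into (None, None).
def pvLoopA : List String → Option Int → Option Int → Option (Option Int × Option Int)
  | p :: next :: rest, l, s =>
      if p = "LAYER" then
        match PySem.Int.ofStr? next with      -- layer_idx = int(parts[i + 1])
        | none => none
        | some v => pvLoopA (next :: rest) (some v) s
      else if p = "SEED" then
        match PySem.Int.ofStr? next with      -- seed_idx = int(parts[i + 1])
        | none => none
        | some v => pvLoopA (next :: rest) l (some v)
      else pvLoopA (next :: rest) l s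
  | _, l, s => some (l, s)

def parse_layer_seed_format_py (seed_id : String) : Option Int × Option Int :=
  let parts := (PySem.Str.split? seed_id "_").getD []  -- sep "_" ≠ "" so split? is always some
  (pvLoopA parts none none).getD (none, none)

-- ===== PORT B =====
-- find(key): the for-loop over the reversed pair list, returning int(nxt) at the
-- first match; `none` = an uncaught ValueError, `some none` = fell through the loop.
def pvFindB : List (String × String) → String → Option (Option Int)
  | [], _ => some none
  | (tok, nxt) :: rest, k =>
      if tok = k then (PySem.Int.ofStr? nxt).map some    -- return int(nxt)
      else pvFindB rest k

def parse_layer_seed_format_py_alt (seed_id : String) : Option Int × Option Int :=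
  let parts := (PySem.Str.split? seed_id "_").getD []  -- sep "_" ≠ "" so split? is always some
  let pairs := (parts.zip parts.tail).reverse          -- list(zip(parts, parts[1:]))[::-1]
  match pvFindB pairs "LAYER", pvFindB pairs "SEED" with
  | some l, some s => (l, s)
  | _, _ => (none, none)                               -- except ValueError

-- ===== PRECONDITION & SPEC =====
-- Pre_ excludes inputs where "LAYER" or "SEED" occurs more than once among the tokens
-- that have a successor: there A calls int() on every occurrence's successor while B
-- looks at the last one only, a first-vs-last/duplicate-key corner where either
-- behaviour is defensible.
def Pre_parse_layer_seed_format_py (seed_id : String) : Prop :=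
  ((PySem.Str.split? seed_id "_").getD []).dropLast.count "LAYER" ≤ 1 ∧
  ((PySem.Str.split? seed_id "_").getD []).dropLast.count "SEED" ≤ 1
instance (seed_id : String) : Decidable (Pre_parse_layer_seed_format_py seed_id) := by
  unfold Pre_parse_layer_seed_format_py; infer_instance

def pvWitness_parse_layer_seed_format_py : String := "LAYER_1_SEED_2"

def Spec_parse_layer_seed_format_py (seed_id : String) (out : Option Int × Option Int) : Prop := out = parse_layer_seed_format_py_alt seed_id
instance (seed_id : String) (out : Option Int × Option Int) : Decidable (Spec_parse_layer_seed_format_py seed_id out) := by unfold Spec_parse_layer_seed_format_py; infer_instance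

-- ===== CLAIM (what is proved, stated in full; the proofs are below) =====
def Claim_equal_parse_layer_seed_format_py : Prop := ∀ (seed_id : String), Dom_parse_layer_seed_format_py seed_id → Pre_parse_layer_seed_format_py seed_id → Spec_parse_layer_seed_format_py seed_id (parse_layer_seed_format_py seed_id)

-- ===== LEMMAS AND PROOFS =====

-- successor of the LAST occurrence of k among tokens that have a successor
def pvSuccLast : List String → String → Option String
  | p :: next :: rest, k =>
      match pvSuccLast (next :: rest) k with
      | some v => some v
      | none => if p = k then some next else none
  | _, _ => none

-- value of the last pair with key k
def pvLastVal : List (String × String) → String → Option String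
  | [], _ => none
  | (a, b) :: rest, k =>
      match pvLastVal rest k with
      | some v => some v
      | none => if a = k then some b else none

-- value of the first pair with key k
def pvFirstVal : List (String × String) → String → Option String
  | [], _ => none
  | (a, b) :: rest, k => if a = k then some b else pvFirstVal rest k

theorem pvFirstVal_append_single (xs : List (String × String)) (x : String × String) (k : String) :
    pvFirstVal (xs ++ [x]) k =
      match pvFirstVal xs k with
      | some v => some v
      | none => if x.1 = k then some x.2 else none := by
  induction xs with
  | nil => cases x; simp [pvFirstVal]
  | cons p rest ih =>
      obtain ⟨a, b⟩ := p
      by_cases h : a = k <;> simp [pvFirstVal, h, ih]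

theorem pvFirstVal_reverse (l : List (String × String)) (k : String) :
    pvFirstVal l.reverse k = pvLastVal l k := by
  induction l with
  | nil => rfl
  | cons p rest ih =>
      obtain ⟨a, b⟩ := p
      rw [List.reverse_cons, pvFirstVal_append_single, ih]
      simp [pvLastVal]

theorem pvLastVal_zip (parts : List String) (k : String) :
    pvLastVal (parts.zip parts.tail) k = pvSuccLast parts k := by
  induction parts with
  | nil => simp [pvLastVal, pvSuccLast]
  | cons p rest ih =>
      cases rest with
      | nil => simp [pvLastVal, pvSuccLast]
      | cons next rest' =>
          simp only [List.tail_cons] at ih ⊢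
          rw [List.zip_cons_cons]
          simp only [pvLastVal, pvSuccLast, ih]

theorem pvSuccLast_eq_none (parts : List String) (k : String) (h : k ∉ parts.dropLast) :
    pvSuccLast parts k = none := by
  induction parts with
  | nil => simp [pvSuccLast]
  | cons p rest ih =>
      cases rest with
      | nil => simp [pvSuccLast]
      | cons next rest' =>
          rw [List.dropLast_cons_of_ne_nil (by simp)] at h
          simp only [List.mem_cons, not_or] at h
          simp only [pvSuccLast, ih h.2]
          rw [if_neg (fun hh => h.1 hh.symm)]

theorem pvSuccLast_cons2_ne (p next k : String) (rest : List String) (h : p ≠ k) :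
    pvSuccLast (p :: next :: rest) k = pvSuccLast (next :: rest) k := by
  simp only [pvSuccLast, if_neg h]
  cases pvSuccLast (next :: rest) k <;> rfl

theorem pvSuccLast_cons2_self (next k : String) (rest : List String)
    (h : pvSuccLast (next :: rest) k = none) :
    pvSuccLast (k :: next :: rest) k = some next := by
  simp [pvSuccLast, h]

-- the result of A's loop described by last-occurrence successor lookups
def pvTr (d : Option Int) : Option String → Option (Option Int)
  | none => some d
  | some s => (PySem.Int.ofStr? s).map some

def pvComb (a b : Option (Option Int)) : Option Int × Option Int :=
  match a, b with
  | some l, some s => (l, s)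
  | _, _ => (none, none)

theorem pvLoopA_cons2_other (p next : String) (rest : List String) (l s : Option Int)
    (hpL : p ≠ "LAYER") (hpS : p ≠ "SEED") :
    pvLoopA (p :: next :: rest) l s = pvLoopA (next :: rest) l s := by
  simp [pvLoopA, hpL, hpS]

theorem pvLoopA_cons2_LAYER (next : String) (rest : List String) (l s : Option Int) :
    pvLoopA ("LAYER" :: next :: rest) l s =
      match PySem.Int.ofStr? next with
      | none => none
      | some v => pvLoopA (next :: rest) (some v) s := by
  simp [pvLoopA]

theorem pvLoopA_cons2_SEED (next : String) (rest : List String) (l s : Option Int) :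
    pvLoopA ("SEED" :: next :: rest) l s =
      match PySem.Int.ofStr? next with
      | none => none
      | some v => pvLoopA (next :: rest) l (some v) := by
  simp [pvLoopA]

theorem pvLoopA_eq (parts : List String)
    (hL : parts.dropLast.count "LAYER" ≤ 1) (hS : parts.dropLast.count "SEED" ≤ 1)
    (l s : Option Int) :
    (pvLoopA parts l s).getD (none, none) =
      pvComb (pvTr l (pvSuccLast parts "LAYER")) (pvTr s (pvSuccLast parts "SEED")) := by
  induction parts generalizing l s with
  | nil => simp [pvLoopA, pvSuccLast, pvTr, pvComb]
  | cons p rest ih =>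
      cases rest with
      | nil => simp [pvLoopA, pvSuccLast, pvTr, pvComb]
      | cons next rest' =>
          have hdl : (p :: next :: rest').dropLast = p :: (next :: rest').dropLast :=
            List.dropLast_cons_of_ne_nil (by simp)
          rw [hdl, List.count_cons] at hL hS
          have hLt : (next :: rest').dropLast.count "LAYER" ≤ 1 := by omega
          have hSt : (next :: rest').dropLast.count "SEED" ≤ 1 := by omega
          by_cases hpL : p = "LAYER"
          · subst hpL
            have hnm : pvSuccLast (next :: rest') "LAYER" = none :=
              pvSuccLast_eq_none _ _ (by
                rw [← List.count_pos_iff]; simp at hL; omega)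
            rw [pvSuccLast_cons2_self _ _ _ hnm,
                pvSuccLast_cons2_ne _ _ _ _ (by decide), pvLoopA_cons2_LAYER]
            cases hof : PySem.Int.ofStr? next with
            | none =>
                rw [show pvTr l (some next) = none from by simp [pvTr, hof]]
                cases pvTr s (pvSuccLast (next :: rest') "SEED") <;> rfl
            | some v =>
                show (pvLoopA (next :: rest') (some v) s).getD (none, none) = _
                rw [ih hLt hSt (some v) s, hnm]
                simp [pvTr, hof]
          · by_cases hpS : p = "SEED"
            · subst hpS
              have hnm : pvSuccLast (next :: rest') "SEED" = none :=
                pvSuccLast_eq_none _ _ (by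
                  rw [← List.count_pos_iff]; simp at hS; omega)
              rw [pvSuccLast_cons2_self _ _ _ hnm,
                  pvSuccLast_cons2_ne _ _ _ _ (by decide), pvLoopA_cons2_SEED]
              cases hof : PySem.Int.ofStr? next with
              | none =>
                  rw [show pvTr s (some next) = none from by simp [pvTr, hof]]
                  cases pvTr l (pvSuccLast (next :: rest') "LAYER") <;> rfl
              | some v =>
                  show (pvLoopA (next :: rest') l (some v)).getD (none, none) = _
                  rw [ih hLt hSt l (some v), hnm]
                  simp [pvTr, hof]
            · rw [pvSuccLast_cons2_ne _ _ _ _ hpL, pvSuccLast_cons2_ne _ _ _ _ hpS,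
                  pvLoopA_cons2_other _ _ _ _ _ hpL hpS]
              exact ih hLt hSt l s

theorem pvFindB_eq (prs : List (String × String)) (k : String) :
    pvFindB prs k = pvTr none (pvFirstVal prs k) := by
  induction prs with
  | nil => rfl
  | cons p rest ih =>
      obtain ⟨a, b⟩ := p
      by_cases h : a = k <;> simp [pvFindB, pvFirstVal, h, ih, pvTr]

-- ===== VERDICT (by name: the statement is the Claim_ definition above) =====
theorem parse_layer_seed_format_py_spec : Claim_equal_parse_layer_seed_format_py := by
  intro seed_id _ hpre
  obtain ⟨hL, hS⟩ := hpre
  unfold Spec_parse_layer_seed_format_py parse_layer_seed_format_py parse_layer_seed_format_py_alt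
  show (pvLoopA ((PySem.Str.split? seed_id "_").getD []) none none).getD (none, none)
      = match pvFindB (((PySem.Str.split? seed_id "_").getD []).zip
                        ((PySem.Str.split? seed_id "_").getD []).tail).reverse "LAYER",
              pvFindB (((PySem.Str.split? seed_id "_").getD []).zip
                        ((PySem.Str.split? seed_id "_").getD []).tail).reverse "SEED" with
        | some l, some s => (l, s)
        | _, _ => (none, none)
  rw [pvLoopA_eq _ hL hS]
  rw [pvFindB_eq, pvFindB_eq, pvFirstVal_reverse, pvFirstVal_reverse,
      pvLastVal_zip, pvLastVal_zip]
  rfl
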